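-- pv_equiv track=rewrite | github.com/weilunhuang-jhu/afap | lib/Utils.py | getVisibilityListPerPoint
-- ===== SOURCE A (Python) =====
-- def getVisibilityListPerPoint(pts, pts_set_per_camera):
--     """
--         For each point, associate a list of cameras that can see it
--         camera_id: 0, 1, 2, ...
--     """
--     visibility_list_per_point = []
--     for pt_id, pt in enumerate(pts):
--         visibility_list = []
--         for camera_id, pts_set in enumerate(pts_set_per_camera):
--             if pt_id in pts_set:
--                 visibility_list.append(camera_id)
--         visibility_list_per_point.append(visibility_list)
--
--     return visibility_list_per_point
-- ===== SOURCE B (Python) =====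
-- def getVisibilityListPerPoint(pts, pts_set_per_camera):
--     """
--         For each point, associate a list of cameras that can see it
--         camera_id: 0, 1, 2, ...
--     """
--     n = len(pts)
--     result = [[] for _ in range(n)]
--     for camera_id, pts_set in enumerate(pts_set_per_camera):
--         for pt_id in set(pts_set):
--             if 0 <= pt_id < n:
--                 result[pt_id].append(camera_id)
--     return result
-- ===== Notes on version B (the rewrite author's own statement) =====
-- stated objective: faster
-- what changed: Inverted the iteration: instead of scanning every camera's point list for every point (membership test per pair), B scatters each camera's (deduplicated) point set directly into the per-point result lists in one pass over the cameras.
import Mathlib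
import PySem

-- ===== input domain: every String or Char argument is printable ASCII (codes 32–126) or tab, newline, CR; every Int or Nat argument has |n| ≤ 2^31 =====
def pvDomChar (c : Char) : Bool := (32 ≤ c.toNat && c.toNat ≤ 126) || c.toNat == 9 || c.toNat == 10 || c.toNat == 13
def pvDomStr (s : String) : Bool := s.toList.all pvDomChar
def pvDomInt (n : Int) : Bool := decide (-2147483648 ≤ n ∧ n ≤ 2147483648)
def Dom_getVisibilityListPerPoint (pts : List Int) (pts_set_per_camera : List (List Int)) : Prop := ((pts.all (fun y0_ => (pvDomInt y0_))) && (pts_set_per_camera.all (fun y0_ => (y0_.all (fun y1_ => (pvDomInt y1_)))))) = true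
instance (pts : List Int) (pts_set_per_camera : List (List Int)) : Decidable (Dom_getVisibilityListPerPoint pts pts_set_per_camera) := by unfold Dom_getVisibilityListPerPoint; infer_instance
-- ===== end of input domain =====

-- B replaces A's per-point scan of every camera list by a single scatter pass over the
-- cameras (objective: faster, O(P+S) instead of O(P*S)); return values agree everywhere.

-- ===== PORT A =====
-- for pt_id, pt in enumerate(pts): for camera_id, pts_set in enumerate(...): if pt_id in pts_set: append
def getVisibilityListPerPoint (pts : List Int) (pts_set_per_camera : List (List Int)) : List (List Int) :=
  (PySem.List.enumerate pts 0).foldl (fun acc p =>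
    acc ++ [(PySem.List.enumerate pts_set_per_camera 0).foldl
      (fun vl q => if p.1 ∈ q.2 then vl ++ [q.1] else vl) []]) []

-- ===== PORT B =====
-- result[pt_id].append(camera_id)  (guarded by 0 <= pt_id < n), value-equivalent functional update
def gvStep (n : Nat) (cid : Int) (r : List (List Int)) (pt : Int) : List (List Int) :=
  if 0 ≤ pt ∧ pt < (n : Int) then r.set pt.toNat (r.getD pt.toNat [] ++ [cid]) else r

def getVisibilityListPerPoint_alt (pts : List Int) (pts_set_per_camera : List (List Int)) : List (List Int) :=
  (PySem.List.enumerate pts_set_per_camera 0).foldl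
    (fun res q => (PySem.Set.ofList q.2).foldl (gvStep pts.length q.1) res)
    (pts.map (fun _ => ([] : List Int)))

-- ===== PRECONDITION & SPEC =====
def Spec_getVisibilityListPerPoint (pts : List Int) (pts_set_per_camera : List (List Int)) (out : List (List Int)) : Prop := out = getVisibilityListPerPoint_alt pts pts_set_per_camera
instance (pts : List Int) (pts_set_per_camera : List (List Int)) (out : List (List Int)) : Decidable (Spec_getVisibilityListPerPoint pts pts_set_per_camera out) := by unfold Spec_getVisibilityListPerPoint; infer_instance

-- ===== CLAIM (what is proved, stated in full; the proofs are below) =====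
def Claim_equal_getVisibilityListPerPoint : Prop := ∀ (pts : List Int) (pts_set_per_camera : List (List Int)), Dom_getVisibilityListPerPoint pts pts_set_per_camera → Spec_getVisibilityListPerPoint pts pts_set_per_camera (getVisibilityListPerPoint pts pts_set_per_camera)

-- ===== LEMMAS AND PROOFS =====

-- the list of camera ids (from an enumerated camera list) that see point i
def visL (i : Int) : List (Int × List Int) → List Int
  | [] => []
  | q :: l => (if i ∈ q.2 then [q.1] else []) ++ visL i l

theorem foldl_visL (i : Int) (l : List (Int × List Int)) (acc : List Int) :
    l.foldl (fun vl q => if i ∈ q.2 then vl ++ [q.1] else vl) acc = acc ++ visL i l := by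
  induction l generalizing acc with
  | nil => simp [visL]
  | cons q l ih => simp [List.foldl_cons, visL, ih]; split <;> simp

theorem foldl_snoc {α β : Type} (f : α → β) (l : List α) (acc : List β) :
    l.foldl (fun a x => a ++ [f x]) acc = acc ++ l.map f := by
  induction l generalizing acc with
  | nil => simp
  | cons x l ih => simp [ih]

theorem gvStep_length (n : Nat) (cid : Int) (r : List (List Int)) (pt : Int) :
    (gvStep n cid r pt).length = r.length := by
  unfold gvStep; split <;> simp

theorem foldl_gvStep_length (n : Nat) (cid : Int) (s : List Int) (r : List (List Int)) :
    (s.foldl (gvStep n cid) r).length = r.length := by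
  induction s generalizing r with
  | nil => rfl
  | cons a s ih => simp [List.foldl_cons, ih, gvStep_length]

theorem foldl_gvStep_getD (n : Nat) (cid : Int) (i : Nat) (hi : i < n) :
    ∀ (s : List Int), s.Nodup → ∀ (r : List (List Int)), r.length = n →
      (s.foldl (gvStep n cid) r).getD i [] =
        r.getD i [] ++ (if (i : Int) ∈ s then [cid] else []) := by
  intro s
  induction s with
  | nil => intro _ r _; simp
  | cons a s ih =>
    intro hs r hr
    simp only [List.foldl_cons]
    have hs' : s.Nodup := (List.nodup_cons.mp hs).2
    have ha : a ∉ s := (List.nodup_cons.mp hs).1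
    have hlen : (gvStep n cid r a).length = n := by rw [gvStep_length]; exact hr
    rw [ih hs' _ hlen]
    by_cases hai : a = (i : Int)
    · subst hai
      have hit : ¬ (((i : Int)) ∈ s) := ha
      have hg : 0 ≤ ((i : Int)) ∧ ((i : Int)) < (n : Int) :=
        ⟨Int.natCast_nonneg i, by exact_mod_cast hi⟩
      simp [gvStep, hg, hit, hr, hi, List.getD_eq_getElem?_getD]
    · have hif : (if ((i : Int)) ∈ a :: s then [cid] else ([] : List Int)) =
          (if ((i : Int)) ∈ s then [cid] else []) := by
        by_cases h : ((i : Int)) ∈ s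
        · simp [List.mem_cons, h]
        · simp [List.mem_cons, h]; omega
      rw [hif]
      congr 1
      unfold gvStep
      split
      · rename_i hg
        have hne : a.toNat ≠ i := by omega
        simp [List.getD_eq_getElem?_getD, List.getElem?_set_ne hne]
      · rfl

theorem scatter_getD (l : List (Int × List Int)) (res : List (List Int)) (n i : Nat)
    (hres : res.length = n) (hi : i < n) :
    (l.foldl (fun r q => (PySem.Set.ofList q.2).foldl (gvStep n q.1) r) res).getD i [] =
      res.getD i [] ++ visL (i : Int) l := by
  induction l generalizing res with
  | nil => simp [visL]
  | cons q l ih =>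
    simp only [List.foldl_cons]
    have hlen : ((PySem.Set.ofList q.2).foldl (gvStep n q.1) res).length = n := by
      rw [foldl_gvStep_length]; exact hres
    rw [ih _ hlen]
    rw [foldl_gvStep_getD n q.1 i hi (PySem.Set.ofList q.2) (PySem.Set.nodup_ofList q.2) res hres]
    simp [visL, PySem.Set.mem_ofList, List.append_assoc]

theorem scatter_length (l : List (Int × List Int)) (res : List (List Int)) (n : Nat) :
    (l.foldl (fun r q => (PySem.Set.ofList q.2).foldl (gvStep n q.1) r) res).length = res.length := by
  induction l generalizing res with
  | nil => rfl
  | cons q l ih => simp [List.foldl_cons, ih, foldl_gvStep_length]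

-- ===== VERDICT (by name: the statement is the Claim_ definition above) =====
theorem getVisibilityListPerPoint_spec : Claim_equal_getVisibilityListPerPoint := by
  intro pts cams _
  unfold Spec_getVisibilityListPerPoint
  have hAeq : getVisibilityListPerPoint pts cams =
      (PySem.List.enumerate pts 0).map (fun p : Int × Int =>
        (PySem.List.enumerate cams 0).foldl
          (fun vl q => if p.1 ∈ q.2 then vl ++ [q.1] else vl) []) := by
    unfold getVisibilityListPerPoint
    exact (foldl_snoc _ _ _).trans (List.nil_append _)
  rw [hAeq]
  unfold getVisibilityListPerPoint_alt
  have hinit : (pts.map (fun _ => ([] : List Int))).length = pts.length := by simp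
  apply List.ext_getElem
  · rw [scatter_length]; simp [PySem.List.length_enumerate]
  · intro i h1 h2
    have hi : i < pts.length := by
      rw [List.length_map, PySem.List.length_enumerate] at h1; exact h1
    have hB := scatter_getD (PySem.List.enumerate cams 0)
        (pts.map (fun _ => ([] : List Int))) pts.length i hinit hi
    rw [List.getD_eq_getElem _ _ h2] at hB
    rw [hB]
    have hinit_i : (pts.map (fun _ => ([] : List Int))).getD i [] = [] := by
      simp [List.getD_eq_getElem?_getD]
    rw [hinit_i, List.nil_append]
    simp only [List.getElem_map, PySem.List.getElem_enumerate]
    rw [foldl_visL]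
    norm_num
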